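-- pv_equiv track=rewrite | github.com/jramaswami/Binary_Search_Python | prefix_with_equivalent_frequencies.py | solve
-- ===== SOURCE A (Python) =====
-- from collections import defaultdict
--
-- def solve(nums):
--     frequency = defaultdict(int)
--     frequency_counts = defaultdict(set)
--     soln = 0
--     for i, n in enumerate(nums):
--         if frequency[n]:
--             frequency_counts[frequency[n]].remove(n)
--             if not frequency_counts[frequency[n]]:
--                 del frequency_counts[frequency[n]]
--         frequency[n] += 1
--         frequency_counts[frequency[n]].add(n)
--         if len(frequency_counts) == 2:
--             max_key = max(frequency_counts.keys())
--             min_key = min(frequency_counts.keys())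
--             if (min_key + 1 == max_key
--             and (len(frequency_counts[max_key]) == 1
--                  or len(frequency_counts[min_key]) == 1)):
--                 soln = max(soln, i + 1)
--         elif len(frequency_counts) == 1:
--             soln = max(soln, i + 1)
--
--     return soln
-- ===== SOURCE B (Python) =====
-- from collections import Counter
--
-- def solve(nums):
--     best = 0
--     for i in range(1, len(nums) + 1):
--         freqs = list(Counter(nums[:i]).values())
--         mn, mx = min(freqs), max(freqs)
--         if mn == mx:
--             best = i
--         elif mn + 1 == mx and (freqs.count(mx) == 1 or freqs.count(mn) == 1):
--             best = i
--     return best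
-- ===== Notes on version B (the rewrite author's own statement) =====
-- stated objective: alternative
-- what changed: A maintains incremental frequency and frequency-of-frequencies dictionaries (with set values) updated element by element in one pass; B instead rebuilds, for each prefix length, a fresh Counter of the prefix and applies the min/max-frequency acceptance rule to its list of values, keeping no state between prefixes.
import Mathlib
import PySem

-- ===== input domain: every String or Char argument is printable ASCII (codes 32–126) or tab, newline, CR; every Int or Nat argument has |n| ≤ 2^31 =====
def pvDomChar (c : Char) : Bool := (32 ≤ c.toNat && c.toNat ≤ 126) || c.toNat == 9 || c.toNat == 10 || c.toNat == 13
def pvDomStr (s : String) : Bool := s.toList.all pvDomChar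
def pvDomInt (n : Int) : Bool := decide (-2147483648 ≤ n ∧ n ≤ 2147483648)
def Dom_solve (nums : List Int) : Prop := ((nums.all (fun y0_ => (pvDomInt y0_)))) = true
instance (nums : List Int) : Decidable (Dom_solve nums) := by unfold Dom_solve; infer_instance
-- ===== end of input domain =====

-- B replaces A's incremental frequency / frequency-of-frequencies dictionaries with a per-prefix
-- recomputation over the prefix's distinct elements (objective: alternative; B is not faster).

-- ===== PORT A =====
-- Loop body of A's for-loop, as a named helper over the state (frequency, frequency_counts, soln).
-- Python's defaultdicts are modelled with getD-with-default (the zero/empty entries a defaultdict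
-- inserts on a pure read are never observed by A); 'frequency_counts[frequency[n]].remove(n)' is
-- ported as Set.discard, exact here because n is always a member of that set at that point
-- (proved as part of the invariant below); 'del' is Dict.erase; max()/min() over the keys are
-- PySem.List.max?/min?, whose .getD 0 default is never taken since the dict has 2 keys there.
def solveStep (st : PySem.Dict Int Int × PySem.Dict Int (PySem.Set Int) × Int)
    (p : Int × Int) : PySem.Dict Int Int × PySem.Dict Int (PySem.Set Int) × Int :=
  let freq := st.1
  let fc := st.2.1
  let soln := st.2.2
  let i := p.1
  let n := p.2
  let f := freq.getD n 0
  let fc :=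
    if f ≠ 0 then
      let s := PySem.Set.discard (fc.getD f PySem.Set.empty) n
      if s = PySem.Set.empty then fc.erase f else fc.insert f s
    else fc
  let freq := freq.insert n (f + 1)
  let fc := fc.insert (f + 1) (PySem.Set.add (fc.getD (f + 1) PySem.Set.empty) n)
  let soln :=
    if fc.size = 2 then
      let maxKey := (PySem.List.max? fc.keys (fun k => k)).getD 0
      let minKey := (PySem.List.min? fc.keys (fun k => k)).getD 0
      if minKey + 1 = maxKey ∧
          ((fc.getD maxKey PySem.Set.empty).length = 1 ∨
           (fc.getD minKey PySem.Set.empty).length = 1) then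
        max soln (i + 1)
      else soln
    else if fc.size = 1 then max soln (i + 1)
    else soln
  (freq, fc, soln)

def solve (nums : List Int) : Int :=
  ((PySem.List.enumerate nums).foldl solveStep (PySem.Dict.empty, PySem.Dict.empty, 0)).2.2

-- ===== PORT B =====
-- Loop body of B's for-loop over prefix lengths i = 1 .. len(nums); nums[:i] is PySem.List.slice,
-- Counter is PySem.Dict.counter (list(...values()) = .values), min(freqs)/max(freqs) are
-- PySem.List.min?/max?; freqs is nonempty for every i >= 1, so the .getD 0 default is never taken.
def altStep (nums : List Int) (best : Int) (i : Int) : Int :=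
  let pre := PySem.List.slice nums none (some i)
  let freqs := (PySem.Dict.counter pre).values
  let mn := (PySem.List.min? freqs (fun v => v)).getD 0
  let mx := (PySem.List.max? freqs (fun v => v)).getD 0
  if mn = mx then i
  else if mn + 1 = mx ∧ (freqs.count mx = 1 ∨ freqs.count mn = 1) then i
  else best

def solve_alt (nums : List Int) : Int :=
  (PySem.List.pyRange 1 ((nums.length : Int) + 1)).foldl (altStep nums) 0

-- ===== PRECONDITION & SPEC =====
def Spec_solve (nums : List Int) (out : Int) : Prop := out = solve_alt nums
instance (nums : List Int) (out : Int) : Decidable (Spec_solve nums out) := by unfold Spec_solve; infer_instance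

-- ===== CLAIM (what is proved, stated in full; the proofs are below) =====
def Claim_equal_solve : Prop := ∀ (nums : List Int), Dom_solve nums → Spec_solve nums (solve nums)

-- ===== LEMMAS AND PROOFS =====
def InvF (q : List Int) (freq : PySem.Dict Int Int) : Prop :=
  ∀ m : Int, freq.getD m 0 = (q.count m : Int)

def InvFC (q : List Int) (fc : PySem.Dict Int (PySem.Set Int)) : Prop :=
  fc.keys.Nodup ∧
  (∀ k : Int, fc.contains k = true ↔ ∃ m, m ∈ q ∧ (q.count m : Int) = k) ∧
  (∀ k : Int, ∀ s : PySem.Set Int, fc.get? k = some s →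
    s.Nodup ∧ ∀ m : Int, m ∈ s ↔ m ∈ q ∧ (q.count m : Int) = k)

theorem find?_congr' {α : Type} (l : List α) (f g : α → Bool) (h : ∀ x ∈ l, f x = g x) :
    l.find? f = l.find? g := by
  induction l with
  | nil => rfl
  | cons a t ih =>
    simp only [List.find?_cons]
    rw [h a (by simp)]
    cases g a <;> simp [ih (fun x hx => h x (by simp [hx]))]

theorem get?_erase {ν : Type} (d : PySem.Dict Int ν) (k k' : Int) :
    (d.erase k).get? k' = if k' = k then none else d.get? k' := by
  simp only [PySem.Dict.erase, PySem.Dict.get?, List.find?_filter]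
  split_ifs with h
  · subst h
    rw [List.find?_eq_none.mpr]
    · rfl
    · intro p hp; simp
  · congr 1
    apply find?_congr'
    intro p hp
    by_cases h2 : p.1 = k' <;> simp [h2]
    omega

theorem keys_erase {ν : Type} (d : PySem.Dict Int ν) (k : Int) :
    (d.erase k).keys = d.keys.filter (fun k' => !(k' == k)) := by
  simp [PySem.Dict.erase, PySem.Dict.keys, List.filter_map, Function.comp_def]

-- the intermediate invariant: fc1 describes p with x deleted from its frequency class

def InvMid (p : List Int) (x : Int) (fc : PySem.Dict Int (PySem.Set Int)) : Prop :=
  fc.keys.Nodup ∧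
  (∀ k : Int, fc.contains k = true ↔ ∃ m, m ∈ p ∧ m ≠ x ∧ (p.count m : Int) = k) ∧
  (∀ k : Int, ∀ s : PySem.Set Int, fc.get? k = some s →
    s.Nodup ∧ ∀ m : Int, m ∈ s ↔ m ∈ p ∧ m ≠ x ∧ (p.count m : Int) = k)

theorem getD_char (p : List Int) (x : Int) (fc : PySem.Dict Int (PySem.Set Int))
    (h : InvMid p x fc) (k : Int) :
    (fc.getD k PySem.Set.empty).Nodup ∧
      (∀ m, m ∈ fc.getD k PySem.Set.empty ↔ m ∈ p ∧ m ≠ x ∧ (p.count m : Int) = k) := by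
  obtain ⟨hnd, hcont, hget⟩ := h
  cases hs : fc.get? k with
  | none =>
    rw [PySem.Dict.get?_eq_none_iff_contains] at hs
    rw [PySem.Dict.getD_eq_get?_getD]
    rw [(PySem.Dict.get?_eq_none_iff_contains _ _).mpr hs]
    constructor
    · simp [PySem.Set.empty]
    · intro m
      simp only [Option.getD_none]
      constructor
      · intro hm; simp [PySem.Set.empty] at hm
      · intro hm
        have : fc.contains k = true := (hcont k).mpr ⟨m, hm⟩
        rw [this] at hs; cases hs
  | some s =>
    rw [PySem.Dict.getD_of_get?_eq_some _ _ hs]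
    exact hget k s hs

theorem mid_inv (p : List Int) (x : Int) (fc : PySem.Dict Int (PySem.Set Int))
    (hFC : InvFC p fc) :
    InvMid p x
      (if (p.count x : Int) ≠ 0 then
        (if PySem.Set.discard (fc.getD (p.count x : Int) PySem.Set.empty) x = PySem.Set.empty
          then fc.erase (p.count x : Int)
          else fc.insert (p.count x : Int) (PySem.Set.discard (fc.getD (p.count x : Int) PySem.Set.empty) x))
       else fc) := by
  obtain ⟨hnd, hcont, hget⟩ := hFC
  have hgetD0 : ∀ k, (fc.getD k PySem.Set.empty).Nodup ∧
      (∀ m, m ∈ fc.getD k PySem.Set.empty ↔ m ∈ p ∧ (p.count m : Int) = k) := by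
    intro k
    cases hs : fc.get? k with
    | none =>
      rw [PySem.Dict.get?_eq_none_iff_contains] at hs
      rw [PySem.Dict.getD_eq_get?_getD, (PySem.Dict.get?_eq_none_iff_contains _ _).mpr hs]
      refine ⟨by simp [PySem.Set.empty], ?_⟩
      intro m
      simp only [Option.getD_none]
      constructor
      · intro hm; simp [PySem.Set.empty] at hm
      · intro hm
        have : fc.contains k = true := (hcont k).mpr ⟨m, hm⟩
        rw [this] at hs; cases hs
    | some s =>
      rw [PySem.Dict.getD_of_get?_eq_some _ _ hs]
      exact hget k s hs
  by_cases hx : (p.count x : Int) ≠ 0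
  · have hxp : x ∈ p := by
      rw [← List.count_pos_iff]
      omega
    simp only [if_pos hx]
    set f : Int := (p.count x : Int) with hf
    set s0 := fc.getD f PySem.Set.empty with hs0
    have hs0m := (hgetD0 f).2
    have hs0nd := (hgetD0 f).1
    have hsd_m : ∀ m, m ∈ PySem.Set.discard s0 x ↔ m ∈ p ∧ m ≠ x ∧ (p.count m : Int) = f := by
      intro m
      rw [PySem.Set.mem_discard, hs0m]
      tauto
    by_cases hemp : PySem.Set.discard s0 x = PySem.Set.empty
    · simp only [if_pos hemp]
      refine ⟨?_, ?_, ?_⟩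
      · rw [keys_erase]; exact hnd.filter _
      · intro k
        rw [PySem.Dict.contains_eq_isSome_get?, get?_erase]
        split_ifs with hk
        · subst hk
          simp only [Option.isSome_none]
          constructor
          · intro h; cases h
          · rintro ⟨m, hm1, hm2, hm3⟩
            have : m ∈ PySem.Set.discard s0 x := (hsd_m m).mpr ⟨hm1, hm2, hm3⟩
            rw [hemp] at this
            simp [PySem.Set.empty] at this
        · rw [← PySem.Dict.contains_eq_isSome_get?, hcont]
          constructor
          · rintro ⟨m, hm1, hm2⟩
            refine ⟨m, hm1, ?_, hm2⟩
            rintro rfl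
            exact hk (by omega)
          · rintro ⟨m, hm1, _, hm2⟩
            exact ⟨m, hm1, hm2⟩
      · intro k s hs
        rw [get?_erase] at hs
        split_ifs at hs with hk
        obtain ⟨h1, h2⟩ := hget k s hs
        refine ⟨h1, fun m => ?_⟩
        rw [h2]
        constructor
        · rintro ⟨hm1, hm2⟩
          refine ⟨hm1, ?_, hm2⟩
          rintro rfl
          exact hk (by omega)
        · rintro ⟨hm1, _, hm2⟩
          exact ⟨hm1, hm2⟩
    · simp only [if_neg hemp]
      refine ⟨?_, ?_, ?_⟩
      · by_cases hc : fc.contains f = true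
        · rw [PySem.Dict.keys_insert_of_contains _ _ hc]; exact hnd
        · rw [PySem.Dict.keys_insert_of_not_contains _ _ (by simpa using hc)]
          simp only [List.nodup_append, List.nodup_cons]
          refine ⟨hnd, by simp, ?_⟩
          intro a ha b hb
          simp at hb
          subst hb
          rintro rfl
          exact hc ((PySem.Dict.contains_iff_mem_keys fc f).mpr ha)
      · intro k
        rw [PySem.Dict.contains_eq_isSome_get?, PySem.Dict.get?_insert]
        split_ifs with hk
        · subst hk
          simp only [Option.isSome_some]
          constructor
          · intro _
            obtain ⟨m, hm⟩ := List.exists_mem_of_ne_nil _ hemp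
            exact ⟨m, (hsd_m m).mp hm⟩
          · intro _; trivial
        · rw [← PySem.Dict.contains_eq_isSome_get?, hcont]
          constructor
          · rintro ⟨m, hm1, hm2⟩
            refine ⟨m, hm1, ?_, hm2⟩
            rintro rfl
            exact hk (by omega)
          · rintro ⟨m, hm1, _, hm2⟩
            exact ⟨m, hm1, hm2⟩
      · intro k s hs
        rw [PySem.Dict.get?_insert] at hs
        split_ifs at hs with hk
        · subst hk
          cases hs
          exact ⟨PySem.Set.nodup_discard _ _ hs0nd, hsd_m⟩
        · obtain ⟨h1, h2⟩ := hget k s hs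
          refine ⟨h1, fun m => ?_⟩
          rw [h2]
          constructor
          · rintro ⟨hm1, hm2⟩
            refine ⟨hm1, ?_, hm2⟩
            rintro rfl
            exact hk (by omega)
          · rintro ⟨hm1, _, hm2⟩
            exact ⟨hm1, hm2⟩
  · -- x not in p
    have hxp : x ∉ p := by
      intro h
      rw [← List.count_pos_iff] at h
      omega
    simp only [if_neg hx]
    refine ⟨hnd, ?_, ?_⟩
    · intro k
      rw [hcont]
      constructor
      · rintro ⟨m, hm1, hm2⟩
        exact ⟨m, hm1, fun he => hxp (he ▸ hm1), hm2⟩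
      · rintro ⟨m, hm1, _, hm2⟩
        exact ⟨m, hm1, hm2⟩
    · intro k s hs
      obtain ⟨h1, h2⟩ := hget k s hs
      refine ⟨h1, fun m => ?_⟩
      rw [h2]
      constructor
      · rintro ⟨hm1, hm2⟩
        exact ⟨hm1, fun he => hxp (he ▸ hm1), hm2⟩
      · rintro ⟨hm1, _, hm2⟩
        exact ⟨hm1, hm2⟩

theorem count_append_singleton (p : List Int) (x m : Int) :
    ((p ++ [x]).count m : Int) = (p.count m : Int) + (if m = x then 1 else 0) := by
  rw [List.count_append]
  push_cast
  congr 1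
  rcases eq_or_ne m x with rfl | h
  · simp
  · simp [h, Ne.symm h]

theorem final_inv (p : List Int) (x : Int) (fc1 : PySem.Dict Int (PySem.Set Int))
    (hM : InvMid p x fc1) :
    InvFC (p ++ [x])
      (fc1.insert ((p.count x : Int) + 1)
        (PySem.Set.add (fc1.getD ((p.count x : Int) + 1) PySem.Set.empty) x)) := by
  have hgd := getD_char p x fc1 hM
  obtain ⟨hnd, hcont, hget⟩ := hM
  set f : Int := (p.count x : Int) with hf
  have hqc : ∀ m : Int, ((p ++ [x]).count m : Int) = (p.count m : Int) + (if m = x then 1 else 0) :=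
    count_append_singleton p x
  have hqx : ((p ++ [x]).count x : Int) = f + 1 := by rw [hqc]; simp [hf]
  refine ⟨?_, ?_, ?_⟩
  · by_cases hc : fc1.contains (f + 1) = true
    · rw [PySem.Dict.keys_insert_of_contains _ _ hc]; exact hnd
    · rw [PySem.Dict.keys_insert_of_not_contains _ _ (by simpa using hc)]
      simp only [List.nodup_append, List.nodup_cons]
      refine ⟨hnd, by simp, ?_⟩
      intro a ha b hb
      simp at hb
      subst hb
      rintro rfl
      exact hc ((PySem.Dict.contains_iff_mem_keys fc1 (f + 1)).mpr ha)
  · intro k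
    rw [PySem.Dict.contains_eq_isSome_get?, PySem.Dict.get?_insert]
    split_ifs with hk
    · subst hk
      simp only [Option.isSome_some]
      constructor
      · intro _
        exact ⟨x, by simp, hqx⟩
      · intro _; trivial
    · rw [← PySem.Dict.contains_eq_isSome_get?, hcont]
      constructor
      · rintro ⟨m, hm1, hm2, hm3⟩
        refine ⟨m, by simp [hm1], ?_⟩
        rw [hqc]
        simp [hm2, hm3]
      · rintro ⟨m, hm1, hm2⟩
        simp only [List.mem_append, List.mem_singleton] at hm1
        rcases hm1 with hm1 | rfl
        · by_cases hmx : m = x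
          · subst hmx
            rw [hqx] at hm2
            exact absurd hm2.symm hk
          · refine ⟨m, hm1, hmx, ?_⟩
            rw [hqc] at hm2
            simpa [hmx] using hm2
        · rw [hqx] at hm2
          exact absurd hm2.symm hk
  · intro k s hs
    rw [PySem.Dict.get?_insert] at hs
    split_ifs at hs with hk
    · subst hk
      cases hs
      refine ⟨PySem.Set.nodup_add _ _ (hgd (f + 1)).1, ?_⟩
      intro m
      rw [PySem.Set.mem_add, (hgd (f + 1)).2]
      constructor
      · rintro (⟨hm1, hm2, hm3⟩ | rfl)
        · refine ⟨by simp [hm1], ?_⟩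
          rw [hqc]
          simp [hm2, hm3]
        · exact ⟨by simp, hqx⟩
      · rintro ⟨hm1, hm2⟩
        by_cases hmx : m = x
        · exact Or.inr hmx
        · left
          simp only [List.mem_append, List.mem_singleton] at hm1
          rcases hm1 with hm1 | rfl
          · refine ⟨hm1, hmx, ?_⟩
            rw [hqc] at hm2
            simpa [hmx] using hm2
          · exact absurd rfl hmx
    · obtain ⟨h1, h2⟩ := hget k s hs
      refine ⟨h1, fun m => ?_⟩
      rw [h2]
      constructor
      · rintro ⟨hm1, hm2, hm3⟩
        refine ⟨by simp [hm1], ?_⟩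
        rw [hqc]
        simp [hm2, hm3]
      · rintro ⟨hm1, hm2⟩
        by_cases hmx : m = x
        · subst hmx
          rw [hqx] at hm2
          exact absurd hm2.symm hk
        · simp only [List.mem_append, List.mem_singleton] at hm1
          rcases hm1 with hm1 | rfl
          · refine ⟨hm1, hmx, ?_⟩
            rw [hqc] at hm2
            simpa [hmx] using hm2
          · exact absurd rfl hmx

theorem enum_append {α : Type} (p : List α) (x : α) (j : Int) :
    PySem.List.enumerate (p ++ [x]) j = PySem.List.enumerate p j ++ [(j + p.length, x)] := by
  induction p generalizing j with
  | nil => simp [PySem.List.enumerate]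
  | cons h t ih => simp [PySem.List.enumerate, ih]; ring_nf

theorem invF_step (p : List Int) (x : Int) (freq : PySem.Dict Int Int) (hF : InvF p freq) :
    InvF (p ++ [x]) (freq.insert x (freq.getD x 0 + 1)) := by
  intro m
  rw [count_append_singleton, PySem.Dict.getD_insert]
  split_ifs with h
  · subst h; rw [hF]
  · rw [hF]; ring

theorem solve_alt_append (p : List Int) (x : Int) :
    solve_alt (p ++ [x]) = altStep (p ++ [x]) (solve_alt p) ((p.length : Int) + 1) := by
  unfold solve_alt
  have hlen : ((p ++ [x]).length : Int) + 1 = ((p.length : Int) + 1) + 1 := by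
    simp only [List.length_append, List.length_singleton]; push_cast; ring
  rw [hlen, PySem.List.pyRange_one_succ_right (by omega), List.foldl_append]
  simp only [List.foldl_cons, List.foldl_nil]
  congr 1
  apply PySem.List.foldl_congr_mem
  intro acc i hi
  rw [PySem.List.mem_pyRange_one] at hi
  have h0 : (0 : Int) ≤ i := by omega
  have hsl : PySem.List.slice (p ++ [x]) none (some i) = PySem.List.slice p none (some i) := by
    rw [PySem.List.slice_to _ h0, PySem.List.slice_to _ h0,
      List.take_append_of_le_length (by omega)]
  unfold altStep
  rw [hsl]

theorem length_eq_one_of_all_eq (l : List Int) (a : Int) (h : l.Nodup) (h2 : ∀ x ∈ l, x = a)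
    (h3 : l ≠ []) : l.length = 1 := by
  match l, h3 with
  | [x], _ => rfl
  | x :: y :: t, _ =>
    have := h2 x (by simp); have := h2 y (by simp)
    simp_all

theorem length_eq_two_of_pair (l : List Int) (a b : Int) (hab : a ≠ b) (h : l.Nodup)
    (h2 : ∀ x, x ∈ l ↔ x = a ∨ x = b) : l.length = 2 := by
  have : l.Perm [a, b] := by
    rw [List.perm_ext_iff_of_nodup h (by simp [hab])]
    intro x; rw [h2]; simp
  simpa using this.length_eq

theorem hit_iff (q : List Int) (hq : q ≠ []) (fc : PySem.Dict Int (PySem.Set Int))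
    (hfc : InvFC q fc)
    (freqs : List Int) (hfr : freqs = (PySem.Set.ofList q).map (fun m => ((q.count m : Nat) : Int))) :
    ((fc.size = 2 ∧
        (PySem.List.min? fc.keys (fun k => k)).getD 0 + 1 = (PySem.List.max? fc.keys (fun k => k)).getD 0 ∧
        ((fc.getD ((PySem.List.max? fc.keys (fun k => k)).getD 0) PySem.Set.empty).length = 1 ∨
         (fc.getD ((PySem.List.min? fc.keys (fun k => k)).getD 0) PySem.Set.empty).length = 1)) ∨
      fc.size = 1)
    ↔ ((PySem.List.min? freqs (fun v => v)).getD 0 = (PySem.List.max? freqs (fun v => v)).getD 0 ∨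
       ((PySem.List.min? freqs (fun v => v)).getD 0 + 1 = (PySem.List.max? freqs (fun v => v)).getD 0 ∧
        (freqs.count ((PySem.List.max? freqs (fun v => v)).getD 0) = 1 ∨
         freqs.count ((PySem.List.min? freqs (fun v => v)).getD 0) = 1))) := by
  obtain ⟨hnd, hcont, hget⟩ := hfc
  -- membership characterisations
  have hmemF : ∀ k, k ∈ freqs ↔ ∃ m, m ∈ q ∧ (q.count m : Int) = k := by
    intro k; subst hfr
    simp only [List.mem_map, PySem.Set.mem_ofList]
  have hmemK : ∀ k, k ∈ fc.keys ↔ ∃ m, m ∈ q ∧ (q.count m : Int) = k := by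
    intro k; rw [← PySem.Dict.contains_iff_mem_keys]; exact hcont k
  have hKF : ∀ k, k ∈ fc.keys ↔ k ∈ freqs := by
    intro k; rw [hmemK, hmemF]
  -- nonemptiness
  obtain ⟨y, t, rfl⟩ : ∃ y t, q = y :: t := by
    cases q with | nil => exact absurd rfl hq | cons y t => exact ⟨y, t, rfl⟩
  have hyF : ((( y :: t).count y : Nat) : Int) ∈ freqs := by
    rw [hmemF]; exact ⟨y, by simp, rfl⟩
  have hFne : freqs ≠ [] := List.ne_nil_of_mem hyF
  obtain ⟨mn, hmn⟩ : ∃ m, PySem.List.min? freqs (fun v => v) = some m := by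
    cases h : PySem.List.min? freqs (fun v => v) with
    | none => rw [PySem.List.min?_eq_none_iff] at h; exact absurd h hFne
    | some m => exact ⟨m, rfl⟩
  obtain ⟨mx, hmx⟩ : ∃ m, PySem.List.max? freqs (fun v => v) = some m := by
    cases h : PySem.List.max? freqs (fun v => v) with
    | none => rw [PySem.List.max?_eq_none_iff] at h; exact absurd h hFne
    | some m => exact ⟨m, rfl⟩
  have hmnF : mn ∈ freqs := PySem.List.min?_mem hmn
  have hmxF : mx ∈ freqs := PySem.List.max?_mem hmx
  have hmnle : ∀ v ∈ freqs, mn ≤ v := PySem.List.min?_isMin hmn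
  have hmxge : ∀ v ∈ freqs, v ≤ mx := PySem.List.max?_isMax hmx
  have hKne : fc.keys ≠ [] := List.ne_nil_of_mem ((hKF _).mpr hmnF)
  obtain ⟨mnK, hmnK⟩ : ∃ m, PySem.List.min? fc.keys (fun k => k) = some m := by
    cases h : PySem.List.min? fc.keys (fun k => k) with
    | none => rw [PySem.List.min?_eq_none_iff] at h; exact absurd h hKne
    | some m => exact ⟨m, rfl⟩
  obtain ⟨mxK, hmxK⟩ : ∃ m, PySem.List.max? fc.keys (fun k => k) = some m := by
    cases h : PySem.List.max? fc.keys (fun k => k) with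
    | none => rw [PySem.List.max?_eq_none_iff] at h; exact absurd h hKne
    | some m => exact ⟨m, rfl⟩
  -- extrema coincide
  have hmnK_eq : mnK = mn := by
    have h1 : mnK ≤ mn := PySem.List.min?_isMin hmnK _ ((hKF _).mpr hmnF)
    have h2 : mn ≤ mnK := hmnle _ ((hKF _).mp (PySem.List.min?_mem hmnK))
    omega
  have hmxK_eq : mxK = mx := by
    have h1 : mx ≤ mxK := PySem.List.max?_isMax hmxK _ ((hKF _).mpr hmxF)
    have h2 : mxK ≤ mx := hmxge _ ((hKF _).mp (PySem.List.max?_mem hmxK))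
    omega
  -- value lengths are freqs counts
  have hlen : ∀ k s, fc.get? k = some s → (s.length : Int) = freqs.count k := by
    intro k s hs
    obtain ⟨hsnd, hsm⟩ := hget k s hs
    have hperm : s.Perm ((PySem.Set.ofList (y :: t)).filter (fun m => ((y :: t).count m : Int) == k)) := by
      rw [List.perm_ext_iff_of_nodup hsnd ((PySem.Set.nodup_ofList _).filter _)]
      intro m
      rw [hsm]
      simp [List.mem_filter, PySem.Set.mem_ofList]
    have hc : freqs.count k = ((PySem.Set.ofList (y :: t)).filter (fun m => ((y :: t).count m : Int) == k)).length := by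
      rw [hfr, List.count, List.countP_map, List.countP_eq_length_filter]
      rfl
    rw [hc, hperm.length_eq]
  have hsize : fc.size = fc.keys.length := by
    simp [PySem.Dict.size, PySem.Dict.keys]
  -- getD at a present key
  have hgetD : ∀ k, k ∈ fc.keys → ∃ s, fc.get? k = some s ∧ fc.getD k PySem.Set.empty = s := by
    intro k hk
    have : fc.contains k = true := (PySem.Dict.contains_iff_mem_keys fc k).mpr hk
    rw [PySem.Dict.contains_eq_isSome_get?] at this
    obtain ⟨s, hs⟩ := Option.isSome_iff_exists.mp this
    exact ⟨s, hs, PySem.Dict.getD_of_get?_eq_some _ _ hs⟩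
  rw [hmn, hmx, hmnK, hmxK]
  simp only [Option.getD_some, hmnK_eq, hmxK_eq]
  constructor
  · rintro (⟨h2, hd, hone⟩ | h1)
    · -- size 2 branch
      refine Or.inr ⟨hd, ?_⟩
      obtain ⟨smx, hsmx, hgmx⟩ := hgetD mx ((hKF _).mpr hmxF)
      obtain ⟨smn, hsmn, hgmn⟩ := hgetD mn ((hKF _).mpr hmnF)
      rcases hone with hone | hone
      · left
        have := hlen mx smx hsmx
        rw [hgmx] at hone
        omega
      · right
        have := hlen mn smn hsmn
        rw [hgmn] at hone
        omega
    · -- size 1: all keys equal, so all freqs equal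
      left
      rw [hsize] at h1
      have hall : ∀ v ∈ freqs, v = mn := by
        intro v hv
        have hvK : v ∈ fc.keys := (hKF _).mpr hv
        have hmnK' : mn ∈ fc.keys := (hKF _).mpr hmnF
        match hk : fc.keys, h1 with
        | [a], _ =>
          rw [hk] at hvK hmnK'
          simp at hvK hmnK'
          omega
      have h3 := hall mx hmxF
      omega
  · rintro (heq | ⟨hd, hone⟩)
    · -- all freqs equal: size 1
      right
      rw [hsize]
      apply length_eq_one_of_all_eq _ mn hnd _ hKne
      intro k hk
      have hkF := (hKF _).mp hk
      have := hmnle _ hkF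
      have := hmxge _ hkF
      omega
    · -- two adjacent values: size 2
      have hmnne : mn ≠ mx := by omega
      have hsz2 : fc.keys.length = 2 := by
        apply length_eq_two_of_pair _ mn mx hmnne hnd
        intro k
        constructor
        · intro hk
          have hkF := (hKF _).mp hk
          have := hmnle _ hkF
          have := hmxge _ hkF
          omega
        · rintro (rfl | rfl)
          · exact (hKF _).mpr hmnF
          · exact (hKF _).mpr hmxF
      refine Or.inl ⟨by rw [hsize]; exact hsz2, hd, ?_⟩
      obtain ⟨smx, hsmx, hgmx⟩ := hgetD mx ((hKF _).mpr hmxF)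
      obtain ⟨smn, hsmn, hgmn⟩ := hgetD mn ((hKF _).mpr hmnF)
      rcases hone with hone | hone
      · left
        have := hlen mx smx hsmx
        rw [hgmx]
        omega
      · right
        have := hlen mn smn hsmn
        rw [hgmn]
        omega

def stA (nums : List Int) : PySem.Dict Int Int × PySem.Dict Int (PySem.Set Int) × Int :=
  (PySem.List.enumerate nums).foldl solveStep (PySem.Dict.empty, PySem.Dict.empty, 0)

theorem stA_append (p : List Int) (x : Int) :
    stA (p ++ [x]) = solveStep (stA p) (((p.length : Int)), x) := by
  unfold stA
  rw [enum_append p x 0, List.foldl_append]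
  norm_num

set_option maxHeartbeats 2000000 in
theorem stA_inv (p : List Int) :
    InvF p (stA p).1 ∧ InvFC p (stA p).2.1 ∧ (stA p).2.2 = solve_alt p ∧
      0 ≤ (stA p).2.2 ∧ (stA p).2.2 ≤ (p.length : Int) := by
  induction p using List.reverseRecOn with
  | nil =>
    refine ⟨?_, ⟨?_, ?_, ?_⟩, ?_, ?_, ?_⟩
    · intro m; simp [stA, PySem.List.enumerate, PySem.Dict.getD_empty]
    · simp [stA, PySem.List.enumerate, PySem.Dict.keys_empty]
    · intro k; simp [stA, PySem.List.enumerate, PySem.Dict.contains_empty]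
    · intro k s hs; simp [stA, PySem.List.enumerate, PySem.Dict.get?_empty] at hs
    · decide
    · decide
    · decide
  | append_singleton p x ih =>
    obtain ⟨hF, hFC, hsoln, h0, hle⟩ := ih
    rw [stA_append]
    rcases hst : stA p with ⟨freq, fc, soln⟩
    rw [hst] at hF hFC hsoln h0 hle
    simp only at hF hFC hsoln h0 hle
    have hf : freq.getD x 0 = (p.count x : Int) := hF x
    simp only [solveStep, hf]
    set fc1 := (if (p.count x : Int) ≠ 0 then
        (if PySem.Set.discard (fc.getD (p.count x : Int) PySem.Set.empty) x = PySem.Set.empty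
          then fc.erase (p.count x : Int)
          else fc.insert (p.count x : Int) (PySem.Set.discard (fc.getD (p.count x : Int) PySem.Set.empty) x))
       else fc) with hfc1
    have hmid : InvMid p x fc1 := by rw [hfc1]; exact mid_inv p x fc hFC
    set fc2 := fc1.insert ((p.count x : Int) + 1)
        (PySem.Set.add (fc1.getD ((p.count x : Int) + 1) PySem.Set.empty) x) with hfc2
    have hfin : InvFC (p ++ [x]) fc2 := final_inv p x fc1 hmid
    clear hmid hfc2
    clear_value fc2
    refine ⟨?_, hfin, ?_, ?_, ?_⟩
    · have := invF_step p x freq hF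
      rw [hf] at this
      exact this
    · -- soln equality
      rw [solve_alt_append]
      have hq : p ++ [x] ≠ [] := by simp
      have hsl : PySem.List.slice (p ++ [x]) none (some ((p.length : Int) + 1)) = p ++ [x] := by
        rw [PySem.List.slice_to _ (by omega)]
        have ht : ((p.length : Int) + 1).toNat = (p ++ [x]).length := by
          simp only [List.length_append, List.length_singleton]; omega
        rw [ht, List.take_length]
      simp only [altStep, hsl]
      have hvals : (PySem.Dict.counter (p ++ [x])).values
          = (PySem.Set.ofList (p ++ [x])).map (fun m => ((p ++ [x]).count m : Int)) := by
        simp only [PySem.Dict.values, PySem.Dict.items_counter, List.map_map]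
        rfl
      rw [hvals]
      have hit := hit_iff (p ++ [x]) hq fc2 hfin
        ((PySem.Set.ofList (p ++ [x])).map (fun m => ((p ++ [x]).count m : Int))) rfl
      have hmax : max soln ((p.length : Int) + 1) = (p.length : Int) + 1 := by omega
      rw [hmax, ← hsoln]
      have hsz : ¬(fc2.size = 2 ∧ fc2.size = 1) := by omega
      split_ifs <;> first | rfl | (exfalso; tauto)
    · -- 0 ≤ soln'
      split_ifs <;> omega
    · -- soln' ≤ length
      simp only [List.length_append, List.length_singleton]
      push_cast
      split_ifs <;> omega


-- ===== VERDICT (by name: the statement is the Claim_ definition above) =====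
theorem solve_spec : Claim_equal_solve := by
  intro nums _
  unfold Spec_solve solve
  exact (stA_inv nums).2.2.1
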